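-- pv_equiv track=rewrite | github.com/rneeser/LatentFrag | src/latentfrag/fm/data/fragment.py | combine_fragments
-- ===== SOURCE A (Python) =====
-- from itertools import combinations
--
-- def combine_fragments(fragments):
--     n = min(len(fragments), 10)
--     all_indices = set().union(*fragments)
--
--     def is_valid_combination(combo):
--         covered_indices = set()
--         for fragment in combo:
--             if any(idx in covered_indices for idx in fragment):
--                 return False
--             covered_indices.update(fragment)
--         return covered_indices == all_indices
--
--     valid_combinations = []
--
--     for r in range(1, n + 1):
--         for combo in combinations(fragments, r):
--             if is_valid_combination(combo):
--                 valid_combinations.append(list(combo))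
--
--     return valid_combinations
-- ===== SOURCE B (Python) =====
-- def combine_fragments(fragments):
--     all_indices = set().union(*fragments)
--     cap = min(len(fragments), 10)
--     results = []
--
--     def dfs(rest, covered, chosen):
--         if covered == all_indices and chosen:
--             results.append(chosen)
--         if len(chosen) == cap:
--             return
--         for i, frag in enumerate(rest):
--             if not any(x in covered for x in frag):
--                 dfs(rest[i + 1:], covered.union(frag), chosen + [frag])
--
--     dfs(fragments, set(), [])
--     # group by size: sizes run over 1..cap, preserving discovery order within a size
--     return [combo for r in range(1, cap + 1) for combo in results if len(combo) == r]
-- ===== Notes on version B (the rewrite author's own statement) =====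
-- stated objective: faster
-- what changed: A tests every combination of fragments of each size r=1..min(n,10) for disjointness and full coverage; B runs one backtracking depth-first search that only ever extends pairwise-disjoint partial selections (pruning at depth 10), records exact covers, and then concatenates the recorded covers grouped by size to reproduce A's size-then-lexicographic order.
import Mathlib
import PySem

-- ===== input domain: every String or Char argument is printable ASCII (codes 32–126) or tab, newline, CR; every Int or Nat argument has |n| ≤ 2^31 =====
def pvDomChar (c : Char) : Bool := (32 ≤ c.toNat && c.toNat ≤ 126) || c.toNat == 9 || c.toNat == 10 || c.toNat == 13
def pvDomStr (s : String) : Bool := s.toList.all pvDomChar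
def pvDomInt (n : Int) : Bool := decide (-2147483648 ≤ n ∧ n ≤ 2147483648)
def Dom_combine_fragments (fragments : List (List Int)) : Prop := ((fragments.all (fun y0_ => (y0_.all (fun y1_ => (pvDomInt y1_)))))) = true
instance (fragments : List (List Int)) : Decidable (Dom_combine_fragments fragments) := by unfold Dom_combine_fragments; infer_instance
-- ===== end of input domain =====

-- B replaces A's exhaustive scan of all fragment combinations of each size by a pruned
-- backtracking search that only extends pairwise-disjoint partial selections (objective: faster).

-- ===== PORT A =====
-- is_valid_combination's loop (early return on an overlapping fragment, final coverage test)
def pvIsValidAux (all : PySem.Set Int) : List (List Int) → PySem.Set Int → Bool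
  | [], covered => PySem.Set.equal covered all
  | f :: rest, covered =>
    if f.any (fun idx => PySem.Set.contains covered idx) then false
    else pvIsValidAux all rest (PySem.Set.update covered f)

def combine_fragments (fragments : List (List Int)) : List (List (List Int)) :=
  let n : Nat := min fragments.length 10
  let allIndices : PySem.Set Int := fragments.foldl (fun s f => PySem.Set.union s f) PySem.Set.empty
  (PySem.List.pyRange 1 ((n : Int) + 1)).foldl
    (fun acc r =>
      (PySem.List.combinations fragments r.toNat).foldl
        (fun acc2 combo =>
          if pvIsValidAux allIndices combo PySem.Set.empty then acc2 ++ [combo] else acc2)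
        acc)
    []

-- ===== PORT B =====
-- dfs(rest, covered, chosen) of Source B: record a full cover, prune at depth cap, and extend
-- `chosen` only with fragments disjoint from `covered` (the for-loop is pvGo)
mutual
def pvDfs (all : PySem.Set Int) (cap : Nat) (rest : List (List Int)) (covered : PySem.Set Int) (chosen : List (List Int)) : List (List (List Int)) :=
  (if PySem.Set.equal covered all && !chosen.isEmpty then [chosen] else []) ++
  (if chosen.length == cap then [] else pvGo all cap rest covered chosen)
  termination_by (rest.length, 1)
def pvGo (all : PySem.Set Int) (cap : Nat) (rest : List (List Int)) (covered : PySem.Set Int) (chosen : List (List Int)) : List (List (List Int)) :=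
  match rest with
  | [] => []
  | f :: rest' =>
    (if f.any (fun x => PySem.Set.contains covered x) then []
     else pvDfs all cap rest' (PySem.Set.union covered f) (chosen ++ [f])) ++
    pvGo all cap rest' covered chosen
  termination_by (rest.length, 0)
end

def combine_fragments_alt (fragments : List (List Int)) : List (List (List Int)) :=
  let allIndices : PySem.Set Int := fragments.foldl (fun s f => PySem.Set.union s f) PySem.Set.empty
  let cap : Nat := min fragments.length 10
  let results := pvDfs allIndices cap fragments PySem.Set.empty []
  (PySem.List.pyRange 1 ((cap : Int) + 1)).flatMap
    (fun r => results.filter (fun c => ((c.length : Int) == r)))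

-- ===== PRECONDITION & SPEC =====
def Spec_combine_fragments (fragments : List (List Int)) (out : List (List (List Int))) : Prop := out = combine_fragments_alt fragments
instance (fragments : List (List Int)) (out : List (List (List Int))) : Decidable (Spec_combine_fragments fragments out) := by unfold Spec_combine_fragments; infer_instance

-- ===== CLAIM (what is proved, stated in full; the proofs are below) =====
def Claim_equal_combine_fragments : Prop := ∀ (fragments : List (List Int)), Dom_combine_fragments fragments → Spec_combine_fragments fragments (combine_fragments fragments)

-- ===== LEMMAS AND PROOFS =====

-- the predicate under which a suffix `c` of picks completes `chosen` (picked with `covered` covered) to a solution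
def pvPred (all covered : PySem.Set Int) (chosen c : List (List Int)) : Bool :=
  pvIsValidAux all c covered && (!chosen.isEmpty || !c.isEmpty)

-- every solution emitted below a go-node strictly extends `chosen`
theorem pvGo_len (all : PySem.Set Int) (cap : Nat) :
    ∀ (rest : List (List Int)) (covered : PySem.Set Int) (chosen c : List (List Int)),
      c ∈ pvGo all cap rest covered chosen → chosen.length < c.length := by
  intro rest
  induction rest with
  | nil => intro covered chosen c hc; simp [pvGo] at hc
  | cons f rest' ih =>
    intro covered chosen c hc
    rw [pvGo] at hc
    rcases List.mem_append.mp hc with h | h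
    · by_cases hhit : (f.any fun x => PySem.Set.contains covered x) = true
      · rw [if_pos hhit] at h; simp at h
      · rw [if_neg hhit] at h
        rw [pvDfs] at h
        rcases List.mem_append.mp h with h1 | h1
        · have hc1 : c = chosen ++ [f] := by
            by_cases hcond : (PySem.Set.equal (PySem.Set.union covered f) all && !(chosen ++ [f]).isEmpty) = true
            · rw [if_pos hcond] at h1; simpa using h1
            · rw [if_neg hcond] at h1; simp at h1
          subst hc1; simp
        · by_cases hcap : (((chosen ++ [f]).length == cap)) = true
          · rw [if_pos hcap] at h1; simp at h1
          · rw [if_neg hcap] at h1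
            have := ih _ _ _ h1
            simp at this; omega
    · exact ih _ _ _ h

-- ===== core: what the filtered-by-length slice of the DFS output is =====

def pvGoStmt (all : PySem.Set Int) (cap : Nat) (rest : List (List Int)) : Prop :=
  ∀ (covered : PySem.Set Int) (chosen : List (List Int)) (k : Nat), 1 ≤ k → chosen.length + k ≤ cap →
    (pvGo all cap rest covered chosen).filter (fun c => c.length == chosen.length + k)
      = ((PySem.List.combinations rest k).filter (pvPred all covered chosen)).map (chosen ++ ·)

theorem pvDfsStmt_of (all : PySem.Set Int) (cap : Nat) (rest : List (List Int))
    (hgo : pvGoStmt all cap rest) :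
    ∀ (covered : PySem.Set Int) (chosen : List (List Int)) (k : Nat), chosen.length + k ≤ cap →
    (pvDfs all cap rest covered chosen).filter (fun c => c.length == chosen.length + k)
      = ((PySem.List.combinations rest k).filter (pvPred all covered chosen)).map (chosen ++ ·) := by
  intro covered chosen k hle
  rw [pvDfs, List.filter_append]
  cases k with
  | zero =>
    have hgoNil : (if chosen.length == cap then [] else pvGo all cap rest covered chosen).filter
        (fun c => c.length == chosen.length + 0) = [] := by
      split
      · simp
      · apply List.filter_eq_nil_iff.mpr
        intro c hc
        have := pvGo_len all cap rest covered chosen c hc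
        simp; omega
    rw [hgoNil, List.append_nil]
    rw [PySem.List.combinations_zero]
    have hpred0 : pvPred all covered chosen [] = (PySem.Set.equal covered all && !chosen.isEmpty) := by
      simp [pvPred, pvIsValidAux]
    by_cases hcond : (PySem.Set.equal covered all && !chosen.isEmpty) = true
    · rw [if_pos hcond]
      simp [hpred0, hcond]
    · rw [if_neg hcond]
      have hc' : (PySem.Set.equal covered all && !chosen.isEmpty) = false := Bool.eq_false_iff.mpr hcond
      simp [hpred0, hc']
  | succ s =>
    have hemit : (if PySem.Set.equal covered all && !chosen.isEmpty then [chosen] else []).filter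
        (fun c => c.length == chosen.length + (s + 1)) = [] := by
      split <;> simp
    rw [hemit, List.nil_append]
    have hlt : (chosen.length == cap) = false := by simp; omega
    rw [hlt]
    simp only [Bool.false_eq_true, if_false]
    exact hgo covered chosen (s + 1) (by omega) hle

theorem pvGoStmt_all (all : PySem.Set Int) (cap : Nat) :
    ∀ (rest : List (List Int)), pvGoStmt all cap rest := by
  intro rest
  induction rest with
  | nil =>
    intro covered chosen k hk hle
    cases k with
    | zero => omega
    | succ s => simp [pvGo, PySem.List.combinations_nil_succ]
  | cons f rest' ih =>
    intro covered chosen k hk hle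
    cases k with
    | zero => omega
    | succ s =>
    rw [pvGo, List.filter_append, PySem.List.combinations_cons_succ, List.filter_append,
      List.map_append, List.filter_map]
    by_cases hhit : (f.any fun x => PySem.Set.contains covered x) = true
    · rw [if_pos hhit]
      have hnil : (PySem.List.combinations rest' s).filter ((pvPred all covered chosen) ∘ (fun c => f :: c)) = [] := by
        apply List.filter_eq_nil_iff.mpr
        intro c _
        have hv : pvIsValidAux all (f :: c) covered = false := by
          rw [pvIsValidAux, if_pos hhit]
        simp [pvPred, hv]
      rw [hnil]
      simp only [List.map_nil, List.filter_nil, List.nil_append]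
      exact ih covered chosen (s + 1) hk hle
    · rw [if_neg hhit]
      congr 1
      · have hAB : chosen.length + (s + 1) = (chosen ++ [f]).length + s := by simp; omega
        rw [hAB]
        rw [pvDfsStmt_of all cap rest' ih (PySem.Set.union covered f) (chosen ++ [f]) s (by simp; omega)]
        have hpred : ∀ c : List (List Int), ((pvPred all covered chosen) ∘ (fun c => f :: c)) c
            = pvPred all (PySem.Set.union covered f) (chosen ++ [f]) c := by
          intro c
          have hu : PySem.Set.union covered f = PySem.Set.update covered f := rfl
          simp only [Function.comp, pvPred, pvIsValidAux, hu]
          rw [if_neg hhit]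
          simp
        rw [List.filter_congr (fun c _ => hpred c)]
        rw [List.map_map]
        apply List.map_congr_left
        intro c _
        simp
      · exact ih covered chosen (s + 1) hk hle

-- ===== VERDICT (by name: the statement is the Claim_ definition above) =====
theorem combine_fragments_spec : Claim_equal_combine_fragments := by
  intro fragments _
  unfold Spec_combine_fragments combine_fragments combine_fragments_alt
  simp only [PySem.List.foldl_append_if_eq_filter, PySem.List.foldl_append_eq_flatMap,
    List.nil_append]
  apply List.flatMap_congr
  intro r hr
  rw [PySem.List.mem_pyRange_one] at hr
  have hrcap : List.length ([] : List (List Int)) + r.toNat ≤ min fragments.length 10 := by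
    simp; omega
  have hq := pvDfsStmt_of (fragments.foldl (fun s f => PySem.Set.union s f) PySem.Set.empty)
    (min fragments.length 10) fragments
    (pvGoStmt_all (fragments.foldl (fun s f => PySem.Set.union s f) PySem.Set.empty)
      (min fragments.length 10) fragments)
    PySem.Set.empty [] r.toNat hrcap
  have hpredEq : ∀ c : List (List Int),
      ((c.length : Int) == r) = (c.length == List.length ([] : List (List Int)) + r.toNat) := by
    intro c
    rw [Bool.eq_iff_iff]
    simp only [beq_iff_eq, List.length_nil, Nat.zero_add]
    omega
  rw [List.filter_congr (fun c _ => hpredEq c), hq]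
  have hfc : (PySem.List.combinations fragments r.toNat).filter
        (pvPred (fragments.foldl (fun s f => PySem.Set.union s f) PySem.Set.empty) PySem.Set.empty [])
      = (PySem.List.combinations fragments r.toNat).filter
        (fun combo => pvIsValidAux (fragments.foldl (fun s f => PySem.Set.union s f) PySem.Set.empty) combo PySem.Set.empty) := by
    apply List.filter_congr
    intro c hc
    have hlen := PySem.List.length_of_mem_combinations hc
    have hne : c.isEmpty = false := by
      cases c
      · rw [List.length_nil] at hlen; omega
      · simp
    simp [pvPred, hne]
  rw [hfc]
  simp
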